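-- pv_equiv track=rewrite | github.com/noopurP/cs5435-hw3 | functions.py | addSpecialChar
-- ===== SOURCE A (Python) =====
-- def addSpecialChar(password):
--    tmp = list(password)
--    prevLetter = False
--    idx = -1
--    for i in range(len(password)):
--       if tmp[i].isdigit():
--          if prevLetter:
--             idx = i
--          prevLetter = False
--       else:
--          prevLetter = True
--    if idx > 0:
--       return password[:idx] + '-' + password[idx:]
--    else:
--       return password
-- ===== SOURCE B (Python) =====
-- def addSpecialChar(password):
--     for i in range(len(password) - 1, 0, -1):
--         if password[i].isdigit() and not password[i - 1].isdigit():
--             return password[:i] + '-' + password[i:]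
--     return password
-- ===== Notes on version B (the rewrite author's own statement) =====
-- stated objective: alternative
-- what changed: Replaces the forward pass with a prevLetter flag and last-hit accumulator by a backward scan that returns at the first non-digit->digit boundary found from the end (same position, found with early termination and no state).
import Mathlib
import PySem

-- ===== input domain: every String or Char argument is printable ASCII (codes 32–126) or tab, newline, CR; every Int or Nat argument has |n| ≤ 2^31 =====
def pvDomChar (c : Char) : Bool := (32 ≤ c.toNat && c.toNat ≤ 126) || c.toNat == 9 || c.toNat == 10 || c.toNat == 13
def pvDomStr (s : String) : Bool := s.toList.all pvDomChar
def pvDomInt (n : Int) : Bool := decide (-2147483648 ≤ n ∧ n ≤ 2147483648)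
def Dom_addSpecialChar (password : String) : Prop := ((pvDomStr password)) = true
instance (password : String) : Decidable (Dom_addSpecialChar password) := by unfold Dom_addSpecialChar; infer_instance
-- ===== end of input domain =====

-- B replaces A's forward pass (prevLetter flag + last-hit accumulator) by a backward scan
-- that returns at the first non-digit→digit boundary seen from the end (objective: alternative).

-- ===== PORT A =====
-- loop body of A: state = (prevLetter, idx); p = (i, tmp[i]) from enumerating tmp
def pvStepA (s : Bool × Int) (p : Int × Char) : Bool × Int :=
  if PySem.Chars.isdigit p.2 then
    (false, if s.1 then p.1 else s.2)
  else
    (true, s.2)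

def addSpecialChar (password : String) : String :=
  -- 'for i in range(len(password)): … tmp[i] …' ported as a fold over enumerate(tmp);
  -- idx is the second component of the final (prevLetter, idx) state
  if ((PySem.List.enumerate password.toList 0).foldl pvStepA (false, -1)).2 > 0 then
    String.ofList (PySem.List.slice password.toList none
        (some ((PySem.List.enumerate password.toList 0).foldl pvStepA (false, -1)).2) ++
      '-' :: PySem.List.slice password.toList
        (some ((PySem.List.enumerate password.toList 0).foldl pvStepA (false, -1)).2))
  else
    password

-- ===== PORT B =====
-- B's backward loop 'for i in range(len(password)-1, 0, -1): if …: return …', as structural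
-- recursion on i; indices are always in range in B, so getD's default ' ' is never read.
def pvFindB (l : List Char) : Nat → Option Nat
  | 0 => none
  | i + 1 =>
    if PySem.Chars.isdigit (l.getD (i + 1) ' ') && !PySem.Chars.isdigit (l.getD i ' ') then
      some (i + 1)
    else
      pvFindB l i

def addSpecialChar_alt (password : String) : String :=
  match pvFindB password.toList (password.toList.length - 1) with
  | some i =>  -- password[:i] + '-' + password[i:]
    String.ofList (password.toList.take i ++ '-' :: password.toList.drop i)
  | none => password

-- ===== PRECONDITION & SPEC =====
def Spec_addSpecialChar (password : String) (out : String) : Prop := out = addSpecialChar_alt password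
instance (password : String) (out : String) : Decidable (Spec_addSpecialChar password out) := by unfold Spec_addSpecialChar; infer_instance

-- ===== CLAIM (what is proved, stated in full; the proofs are below) =====
def Claim_equal_addSpecialChar : Prop := ∀ (password : String), Dom_addSpecialChar password → Spec_addSpecialChar password (addSpecialChar password)

-- ===== LEMMAS AND PROOFS =====

-- B's search only reads indices ≤ its counter, so appending past them changes nothing
theorem pvFindB_append (l : List Char) (c : Char) :
    ∀ j, j < l.length → pvFindB (l ++ [c]) j = pvFindB l j := by
  intro j
  induction j with
  | zero => intro _; rfl
  | succ i ih =>
    intro h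
    simp only [pvFindB, List.getD_append _ _ _ _ h,
      List.getD_append _ _ _ _ (Nat.lt_of_succ_lt h)]
    rw [ih (by omega)]

theorem pvFindB_pos (l : List Char) (j i : Nat) (h : pvFindB l j = some i) : 0 < i := by
  induction j with
  | zero => simp [pvFindB] at h
  | succ k ih =>
    simp only [pvFindB] at h
    split at h
    · injection h with h'; omega
    · exact ih h

-- the invariant tying A's fold state to B's backward search
theorem foldA_eq (l : List Char) :
    (PySem.List.enumerate l 0).foldl pvStepA (false, -1) =
      ((match l.getLast? with
        | none => false
        | some c => !PySem.Chars.isdigit c),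
       (match pvFindB l (l.length - 1) with
        | some i => (i : Int)
        | none => -1)) := by
  induction l using List.reverseRecOn with
  | nil => rfl
  | append_singleton l c ih =>
    rw [PySem.List.enumerate_append, List.foldl_append, ih]
    simp only [PySem.List.enumerate_cons, PySem.List.enumerate_nil, List.foldl_cons,
      List.foldl_nil, zero_add]
    rcases List.eq_nil_or_concat l with hl | ⟨l', c', rfl⟩
    · subst hl
      simp only [List.nil_append, List.getLast?_singleton, List.length_singleton]
      by_cases hd : PySem.Chars.isdigit c <;> simp [pvStepA, pvFindB, hd]
    · simp only [List.concat_eq_append] at *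
      have htop : pvFindB ((l' ++ [c']) ++ [c]) (l'.length + 1)
          = if PySem.Chars.isdigit c && !PySem.Chars.isdigit c' then
              some (l'.length + 1)
            else pvFindB (l' ++ [c']) l'.length := by
        simp only [pvFindB]
        have h1 : ((l' ++ [c']) ++ [c]).getD (l'.length + 1) ' ' = c := by
          rw [List.getD_append_right _ _ _ _ (by simp)]
          simp
        have h2 : ((l' ++ [c']) ++ [c]).getD l'.length ' ' = c' := by
          rw [List.getD_append _ _ _ _ (by simp)]
          rw [List.getD_append_right _ _ _ _ (by omega)]
          simp
        rw [h1, h2, pvFindB_append _ _ _ (by simp)]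
      have hlast : (l' ++ [c']).getLast? = some c' := by simp
      have hlast2 : ((l' ++ [c']) ++ [c]).getLast? = some c := by simp
      simp only [List.length_append, List.length_singleton, Nat.add_sub_cancel]
      rw [htop, hlast, hlast2]
      by_cases hd : PySem.Chars.isdigit c <;>
        by_cases hd' : PySem.Chars.isdigit c' <;>
          simp [pvStepA, hd, hd']

-- ===== VERDICT (by name: the statement is the Claim_ definition above) =====
theorem addSpecialChar_spec : Claim_equal_addSpecialChar := by
  unfold Claim_equal_addSpecialChar Spec_addSpecialChar
  intro password _
  unfold addSpecialChar addSpecialChar_alt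
  simp only [foldA_eq]
  cases hf : pvFindB password.toList (password.toList.length - 1) with
  | none => simp
  | some i =>
    have hi : 0 < i := pvFindB_pos _ _ _ hf
    simp only [if_pos (by exact_mod_cast hi : ((i : Int) > 0)),
      PySem.List.slice_to_natCast, PySem.List.slice_from_natCast]
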